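-- pv_equiv track=rewrite | github.com/fernandoosorio/extrator-normas | extrator.py | extrair_intervalo_entre_artigos
-- ===== SOURCE A (Python) =====
-- def extrair_intervalo_entre_artigos(numero_artigos_encontrados):
--     intervalo = []
--     ultimo_artigo = numero_artigos_encontrados[-1]
--     for artigo in numero_artigos_encontrados:
--         if artigo == ultimo_artigo:
--             return intervalo
--         inicio = artigo
--         final = inicio + 1
--         while final not in numero_artigos_encontrados:
--             final = final + 1
--         intervalo.append([inicio, final])
--     return intervalo
-- ===== SOURCE B (Python) =====
-- def extrair_intervalo_entre_artigos(numero_artigos_encontrados):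
--     ultimo_artigo = numero_artigos_encontrados[-1]
--     vals = sorted(set(numero_artigos_encontrados))
--     # each distinct value's immediate successor among the present values
--     proximo = dict(zip(vals, vals[1:]))
--     intervalo = []
--     for artigo in numero_artigos_encontrados:
--         if artigo == ultimo_artigo:
--             return intervalo
--         intervalo.append([artigo, proximo[artigo]])
--     return intervalo
-- ===== Notes on version B (the rewrite author's own statement) =====
-- stated objective: faster
-- what changed: Instead of a linear counting-up search 'final += 1 while final not in list' (a list-membership scan per step) for every article, B sorts the distinct values once and builds a successor dictionary dict(zip(vals, vals[1:])), then each interval end is a single O(1) lookup.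
import Mathlib
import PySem

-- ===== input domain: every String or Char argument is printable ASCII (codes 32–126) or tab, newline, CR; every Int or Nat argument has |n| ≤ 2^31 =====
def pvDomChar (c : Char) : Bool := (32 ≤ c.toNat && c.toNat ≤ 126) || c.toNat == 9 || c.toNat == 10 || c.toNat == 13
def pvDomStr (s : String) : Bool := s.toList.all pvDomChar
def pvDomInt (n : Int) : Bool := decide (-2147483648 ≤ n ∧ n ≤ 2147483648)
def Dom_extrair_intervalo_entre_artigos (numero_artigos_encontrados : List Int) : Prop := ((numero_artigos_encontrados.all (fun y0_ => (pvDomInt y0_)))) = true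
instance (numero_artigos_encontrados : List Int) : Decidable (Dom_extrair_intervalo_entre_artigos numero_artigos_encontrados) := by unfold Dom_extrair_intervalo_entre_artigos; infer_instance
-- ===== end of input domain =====

-- B replaces A's per-article counting-up search (`final += 1 while final not in list`)
-- with a sorted distinct-value list and a successor dictionary built once (objective: faster).

-- ===== PORT A =====
-- the `while final not in numero_artigos_encontrados: final += 1` loop, with enough fuel
-- to cover the search up to the largest value of the list (inside Pre_ the fuel suffices,
-- so this is exact on Pre_; Python diverges where no larger value exists)
def pvFindNext (xs : List Int) (fuel : Nat) (final : Int) : Int :=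
  match fuel with
  | 0 => final
  | f + 1 => if final ∈ xs then final else pvFindNext xs f (final + 1)

def pvFuel (xs : List Int) (a : Int) : Nat :=
  xs.foldl (fun acc y => max acc (y - a).toNat) 0

def pvLoopA (xs : List Int) (u : Int) : List Int → List (List Int) → List (List Int)
  | [], acc => acc
  | a :: rest, acc =>
    if a = u then acc
    else pvLoopA xs u rest (acc ++ [[a, pvFindNext xs (pvFuel xs a) (a + 1)]])

def extrair_intervalo_entre_artigos (numero_artigos_encontrados : List Int) : List (List Int) :=
  match PySem.List.pyGet? numero_artigos_encontrados (-1) with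
  | none => []   -- IndexError on []; excluded by Pre_
  | some ultimo => pvLoopA numero_artigos_encontrados ultimo numero_artigos_encontrados []

-- ===== PORT B =====
def pvLoopB (prox : PySem.Dict Int Int) (u : Int) : List Int → List (List Int) → List (List Int)
  | [], acc => acc
  | a :: rest, acc =>
    if a = u then acc
    else pvLoopB prox u rest (acc ++ [[a, prox.getD a 0]])  -- KeyError impossible inside Pre_

def extrair_intervalo_entre_artigos_alt (numero_artigos_encontrados : List Int) : List (List Int) :=
  match PySem.List.pyGet? numero_artigos_encontrados (-1) with
  | none => []   -- IndexError on []; excluded by Pre_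
  | some ultimo =>
    let vals := PySem.List.sorted (PySem.Set.ofList numero_artigos_encontrados) (fun x => x) false
    let prox := PySem.Dict.ofList (vals.zip vals.tail)
    pvLoopB prox ultimo numero_artigos_encontrados []

-- ===== PRECONDITION & SPEC =====
-- Pre_ excludes the empty list (A raises IndexError) and lists where some article before the
-- first occurrence of the last value has no strictly larger value present (A's while loop diverges).
def Pre_extrair_intervalo_entre_artigos (numero_artigos_encontrados : List Int) : Prop :=
  numero_artigos_encontrados ≠ [] ∧
  ∀ a ∈ numero_artigos_encontrados.takeWhile
      (fun a => a ≠ numero_artigos_encontrados.getLastD 0),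
    ∃ b ∈ numero_artigos_encontrados, a < b
instance (numero_artigos_encontrados : List Int) : Decidable (Pre_extrair_intervalo_entre_artigos numero_artigos_encontrados) := by unfold Pre_extrair_intervalo_entre_artigos; infer_instance

def pvWitness_extrair_intervalo_entre_artigos : List Int := [1, 3, 4, 7]

def Spec_extrair_intervalo_entre_artigos (numero_artigos_encontrados : List Int) (out : List (List Int)) : Prop := out = extrair_intervalo_entre_artigos_alt numero_artigos_encontrados
instance (numero_artigos_encontrados : List Int) (out : List (List Int)) : Decidable (Spec_extrair_intervalo_entre_artigos numero_artigos_encontrados out) := by unfold Spec_extrair_intervalo_entre_artigos; infer_instance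

-- ===== CLAIM (what is proved, stated in full; the proofs are below) =====
def Claim_equal_extrair_intervalo_entre_artigos : Prop := ∀ (numero_artigos_encontrados : List Int), Dom_extrair_intervalo_entre_artigos numero_artigos_encontrados → Pre_extrair_intervalo_entre_artigos numero_artigos_encontrados → Spec_extrair_intervalo_entre_artigos numero_artigos_encontrados (extrair_intervalo_entre_artigos numero_artigos_encontrados)

-- ===== LEMMAS AND PROOFS =====

-- every list element's (y - a).toNat is covered by pvFuel xs a
theorem pv_le_fuel (xs : List Int) (a y : Int) (hy : y ∈ xs) :
    (y - a).toNat ≤ pvFuel xs a := by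
  unfold pvFuel
  have H : ∀ (l : List Int) (init : Nat), y ∈ l →
      (y - a).toNat ≤ l.foldl (fun acc y => max acc (y - a).toNat) init := by
    intro l
    induction l with
    | nil => intro _ h; simp at h
    | cons z t ih =>
      intro init h
      rcases List.mem_cons.mp h with rfl | h
      · have mono : ∀ (l : List Int) (i j : Nat), i ≤ j →
            i ≤ l.foldl (fun acc y => max acc (y - a).toNat) j := by
          intro l
          induction l with
          | nil => intro i j h; simpa using h
          | cons w t ih => intro i j h; exact ih i _ (le_trans h (le_max_left _ _))
        exact mono t _ _ (le_max_right _ _)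
      · exact ih _ h
  exact H xs 0 hy

-- pvFindNext finds the least element of xs that is ≥ start, given enough fuel
theorem pvFindNext_spec (xs : List Int) (m : Int) (hm : m ∈ xs) :
    ∀ (fuel : Nat) (start : Int), start ≤ m → (∀ t ∈ xs, start ≤ t → m ≤ t) →
      (m - start).toNat < fuel → pvFindNext xs fuel start = m := by
  intro fuel
  induction fuel with
  | zero => intro start _ _ h; omega
  | succ f ih =>
    intro start hsm hlow hf
    unfold pvFindNext
    by_cases hin : start ∈ xs
    · simp only [hin, if_true]
      have := hlow start hin le_rfl
      omega
    · simp only [hin, if_false]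
      have hne : start ≠ m := fun h => hin (h ▸ hm)
      exact ih (start + 1) (by omega)
        (fun t ht hst => hlow t ht (by omega)) (by omega)

-- the first components of vs.zip vs.tail form a sublist of vs
theorem pv_fst_zip_sublist {α β : Type} (as : List α) (bs : List β) :
    ((as.zip bs).map Prod.fst).Sublist as := by
  induction as generalizing bs with
  | nil => simp
  | cons a t ih =>
    cases bs with
    | nil => simp
    | cons b bt => simpa using List.Sublist.cons₂ a (ih bt)

-- find? in zip vals vals[1:] on a strictly increasing list: the immediate (least) successor
theorem pv_zip_find (vs : List Int) (hs : vs.Pairwise (· < ·)) (a b : Int)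
    (ha : a ∈ vs) (hb : b ∈ vs) (hab : a < b) :
    ∃ m, (vs.zip vs.tail).find? (fun p => p.1 == a) = some (a, m) ∧
      m ∈ vs ∧ a < m ∧ ∀ t ∈ vs, a < t → m ≤ t := by
  induction vs with
  | nil => simp at ha
  | cons v rest ih =>
    match rest, hs with
    | [], _ => simp at ha hb; omega
    | w :: rest', hs =>
      have hpair := List.pairwise_cons.mp hs
      rcases List.mem_cons.mp ha with rfl | ha'
      · -- a = v : successor is w
        refine ⟨w, ?_, by simp, hpair.1 w (by simp), ?_⟩
        · simp
        · intro t ht hat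
          rcases List.mem_cons.mp ht with rfl | ht'
          · omega
          · rcases List.mem_cons.mp ht' with rfl | ht''
            · exact le_rfl
            · exact le_of_lt ((List.pairwise_cons.mp hpair.2).1 t ht'')
      · -- a is in the tail; v < a, recurse
        have hva : v < a := hpair.1 a ha'
        have hbrest : b ∈ w :: rest' := by
          rcases List.mem_cons.mp hb with rfl | h
          · omega
          · exact h
        obtain ⟨m, hfind, hmem, ham, hleast⟩ := ih hpair.2 ha' hbrest
        refine ⟨m, ?_, List.mem_cons_of_mem v hmem, ham, ?_⟩
        · have hne : (v == a) = false := by simp; omega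
          simpa [List.find?, hne] using hfind
        · intro t ht hat
          rcases List.mem_cons.mp ht with rfl | ht'
          · omega
          · exact hleast t ht' hat

-- per-article value: the fueled counting-up search equals the successor-dict lookup
theorem pv_elem_eq (xs : List Int) (a : Int) (haxs : a ∈ xs)
    (hex : ∃ b ∈ xs, a < b) :
    pvFindNext xs (pvFuel xs a) (a + 1) =
      (PySem.Dict.ofList
        ((PySem.List.sorted (PySem.Set.ofList xs) (fun x => x) false).zip
         (PySem.List.sorted (PySem.Set.ofList xs) (fun x => x) false).tail)).getD a 0 := by
  set vals := PySem.List.sorted (PySem.Set.ofList xs) (fun x => x) false with hvals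
  have hmemv : ∀ y : Int, y ∈ vals ↔ y ∈ xs := by
    intro y
    rw [hvals, PySem.List.mem_sorted, PySem.Set.mem_ofList]
  have hsorted : vals.Pairwise (· < ·) := PySem.List.sorted_ofList_pairwise_lt xs
  obtain ⟨b, hb, hab⟩ := hex
  obtain ⟨m, hfind, hmem, ham, hleast⟩ :=
    pv_zip_find vals hsorted a b ((hmemv a).mpr haxs) ((hmemv b).mpr hb) hab
  have hnodup : vals.Nodup := hsorted.nodup
  have hkeys : ((vals.zip vals.tail).map Prod.fst).Nodup :=
    hnodup.sublist (pv_fst_zip_sublist vals vals.tail)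
  have hitems : (PySem.Dict.ofList (vals.zip vals.tail)).items = vals.zip vals.tail := by
    have := PySem.Dict.items_foldl_insert_fresh (l := vals.zip vals.tail)
      (k := Prod.fst) (v := Prod.snd) (d := PySem.Dict.empty)
      (by intro p _; exact PySem.Dict.contains_empty p.1) hkeys
    simpa [PySem.Dict.ofList, PySem.Dict.update] using this
  have hget : (PySem.Dict.ofList (vals.zip vals.tail)).get? a = some m := by
    simp only [PySem.Dict.get?, hitems, hfind, Option.map_some]
  have hgetD : (PySem.Dict.ofList (vals.zip vals.tail)).getD a 0 = m := by
    rw [PySem.Dict.getD_eq_get?_getD, hget]; rfl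
  rw [hgetD]
  exact pvFindNext_spec xs m ((hmemv m).mp hmem) (pvFuel xs a) (a + 1) (by omega)
    (fun t ht hst => hleast t ((hmemv t).mpr ht) (by omega))
    (by have := pv_le_fuel xs a m ((hmemv m).mp hmem); omega)

-- the two loops agree as long as every article before the first `u` has a larger value present
theorem pv_loop_eq (xs : List Int) (u : Int) :
    ∀ (l : List Int) (acc : List (List Int)),
      (∀ a ∈ l.takeWhile (fun a => a ≠ u), a ∈ xs ∧ ∃ b ∈ xs, a < b) →
      pvLoopA xs u l acc =
        pvLoopB (PySem.Dict.ofList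
          ((PySem.List.sorted (PySem.Set.ofList xs) (fun x => x) false).zip
           (PySem.List.sorted (PySem.Set.ofList xs) (fun x => x) false).tail)) u l acc := by
  intro l
  induction l with
  | nil => intro acc _; rfl
  | cons a rest ih =>
    intro acc h
    simp only [pvLoopA, pvLoopB]
    by_cases hau : a = u
    · rw [if_pos hau, if_pos hau]
    · rw [if_neg hau, if_neg hau]
      have htw : a ∈ (a :: rest).takeWhile (fun a => a ≠ u) := by
        simp [hau]
      obtain ⟨haxs, hex⟩ := h a htw
      rw [pv_elem_eq xs a haxs hex]
      apply ih
      intro a' ha'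
      apply h
      rw [List.takeWhile_cons]
      simp only [hau, decide_not]
      simpa using List.mem_cons_of_mem a ha'

-- ===== VERDICT (by name: the statement is the Claim_ definition above) =====
theorem extrair_intervalo_entre_artigos_spec : Claim_equal_extrair_intervalo_entre_artigos := by
  intro xs _hdom hpre
  obtain ⟨hne, hpre⟩ := hpre
  unfold Spec_extrair_intervalo_entre_artigos
  unfold extrair_intervalo_entre_artigos extrair_intervalo_entre_artigos_alt
  rw [PySem.List.pyGet?_neg_one]
  cases hlast : xs.getLast? with
  | none => exact absurd (List.getLast?_eq_none_iff.mp hlast) hne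
  | some u =>
    have hu : xs.getLastD 0 = u := by
      rw [List.getLastD_eq_getLast?, hlast]; rfl
    apply pv_loop_eq
    intro a ha
    refine ⟨(List.takeWhile_sublist _).subset ha, ?_⟩
    apply hpre
    rw [hu]
    exact ha
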